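-- pv_equiv track=rewrite | github.com/saulspatz/sudoku | junk.py | kingsMove
-- ===== SOURCE A (Python) =====
-- def kingsMove(t):
--     for x,y in t:
--         for h in (-1,0,1):
--             for v in (-1,0,1):
--                 if h==v==0:
--                     continue
--                 if (x+h,y+v) in t:
--                     return True
--     return False
-- ===== SOURCE B (Python) =====
-- def kingsMove(t):
--     cells = list(t)
--     for i in range(len(cells)):
--         ax, ay = cells[i]
--         for bx, by in cells[i+1:]:
--             if max(abs(ax - bx), abs(ay - by)) == 1:
--                 return True
--     return False
-- ===== Notes on version B (the rewrite author's own statement) =====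
-- stated objective: simpler
-- what changed: B checks each unordered pair of cells once for Chebyshev distance 1 instead of probing each cell's 8 neighbor coordinates for membership in the list.
import Mathlib
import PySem

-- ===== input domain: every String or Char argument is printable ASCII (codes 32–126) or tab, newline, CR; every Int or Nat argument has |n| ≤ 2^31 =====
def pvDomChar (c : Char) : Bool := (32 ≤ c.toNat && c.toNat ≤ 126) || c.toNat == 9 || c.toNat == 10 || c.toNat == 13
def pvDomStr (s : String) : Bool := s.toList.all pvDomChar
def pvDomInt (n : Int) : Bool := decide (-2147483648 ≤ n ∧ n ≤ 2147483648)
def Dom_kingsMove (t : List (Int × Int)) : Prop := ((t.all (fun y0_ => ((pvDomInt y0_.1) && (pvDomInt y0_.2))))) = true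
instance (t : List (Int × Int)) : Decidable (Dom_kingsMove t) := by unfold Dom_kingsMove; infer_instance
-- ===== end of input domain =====

-- B replaces A's 8-neighbor membership probes by a single Chebyshev-distance test per
-- unordered pair of cells (objective: simpler).
-- ===== PORT A =====
def kingsMove (t : List (Int × Int)) : Bool :=
  t.any (fun p =>
    ([-1, 0, 1] : List Int).any (fun h =>
      ([-1, 0, 1] : List Int).any (fun v =>
        if h == 0 && v == 0 then false
        else t.contains (p.1 + h, p.2 + v))))

-- ===== PORT B =====
-- outer loop over indices i; inner loop over cells[i+1:]  (head :: rest recursion)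
def kingsMove_alt : List (Int × Int) → Bool
  | [] => false
  | a :: rest =>
      rest.any (fun b => max |a.1 - b.1| |a.2 - b.2| == 1) || kingsMove_alt rest

-- ===== PRECONDITION & SPEC =====
def Spec_kingsMove (t : List (Int × Int)) (out : Bool) : Prop := out = kingsMove_alt t
instance (t : List (Int × Int)) (out : Bool) : Decidable (Spec_kingsMove t out) := by unfold Spec_kingsMove; infer_instance

-- ===== CLAIM (what is proved, stated in full; the proofs are below) =====
def Claim_equal_kingsMove : Prop := ∀ (t : List (Int × Int)), Dom_kingsMove t → Spec_kingsMove t (kingsMove t)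

-- ===== LEMMAS AND PROOFS =====

-- the common relation: two cells at Chebyshev distance exactly 1
def pvAdj (a b : Int × Int) : Prop := max |a.1 - b.1| |a.2 - b.2| = 1

theorem pvAdj_iff (a b : Int × Int) :
    pvAdj a b ↔ ((a.1 - b.1 = -1 ∨ a.1 - b.1 = 0 ∨ a.1 - b.1 = 1) ∧
      (a.2 - b.2 = -1 ∨ a.2 - b.2 = 0 ∨ a.2 - b.2 = 1) ∧ ¬(a.1 - b.1 = 0 ∧ a.2 - b.2 = 0)) := by
  unfold pvAdj
  simp only [Int.abs_eq_natAbs, max_def]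
  split_ifs <;> omega

theorem pvAdj_symm {a b : Int × Int} (h : pvAdj a b) : pvAdj b a := by
  obtain ⟨x, y⟩ := a; obtain ⟨u, v⟩ := b
  rw [pvAdj_iff] at h ⊢; dsimp only at h ⊢; omega

theorem pvAdj_irrefl (a : Int × Int) : ¬ pvAdj a a := by
  obtain ⟨x, y⟩ := a
  rw [pvAdj_iff]; dsimp only; omega

theorem kingsMove_iff (t : List (Int × Int)) :
    kingsMove t = true ↔ ∃ p ∈ t, ∃ q ∈ t, pvAdj p q := by
  unfold kingsMove
  simp only [List.any_eq_true, List.mem_cons, List.contains_eq_mem,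
    Bool.and_eq_true, beq_iff_eq, List.not_mem_nil, or_false]
  constructor
  · rintro ⟨p, hp, h, hh, v, hv, hmem⟩
    by_cases hz : h = 0 ∧ v = 0
    · rw [if_pos hz] at hmem; exact absurd hmem (by simp)
    · rw [if_neg hz] at hmem
      refine ⟨p, hp, (p.1 + h, p.2 + v), by simpa using hmem, ?_⟩
      rw [pvAdj_iff]; dsimp only
      refine ⟨by omega, by omega, by omega⟩
  · rintro ⟨p, hp, q, hq, hadj⟩
    rw [pvAdj_iff] at hadj
    refine ⟨p, hp, q.1 - p.1, by omega, q.2 - p.2, by omega, ?_⟩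
    rw [if_neg (by omega : ¬(q.1 - p.1 = 0 ∧ q.2 - p.2 = 0))]
    simpa using hq

theorem kingsMove_alt_iff (t : List (Int × Int)) :
    kingsMove_alt t = true ↔ ∃ p ∈ t, ∃ q ∈ t, pvAdj p q := by
  induction t with
  | nil => simp [kingsMove_alt]
  | cons a rest ih =>
    simp only [kingsMove_alt, Bool.or_eq_true, List.any_eq_true, beq_iff_eq, ih,
      List.mem_cons]
    constructor
    · rintro (⟨b, hb, hR⟩ | ⟨p, hp, q, hq, hR⟩)
      · exact ⟨a, Or.inl rfl, b, Or.inr hb, hR⟩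
      · exact ⟨p, Or.inr hp, q, Or.inr hq, hR⟩
    · rintro ⟨p, hp | hp, q, hq | hq, hR⟩
      · subst hp; subst hq; exact absurd hR (pvAdj_irrefl _)
      · subst hp; exact Or.inl ⟨q, hq, hR⟩
      · subst hq; exact Or.inl ⟨p, hp, pvAdj_symm hR⟩
      · exact Or.inr ⟨p, hp, q, hq, hR⟩

-- ===== VERDICT (by name: the statement is the Claim_ definition above) =====
theorem kingsMove_spec : Claim_equal_kingsMove := by
  intro t _
  unfold Spec_kingsMove
  rw [Bool.eq_iff_iff, kingsMove_iff, kingsMove_alt_iff]
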